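-- pv_equiv track=rewrite | github.com/RAITec/BracoRobotico | software/src/tratamento_dados/tratamentoDados.py | _extrair_valor_numerico
-- ===== SOURCE A (Python) =====
-- NUMEROS_MAP = {
--     "zero" : 0 , "cinco" : 5 , "dez" : 10 , "quinze" : 15 , "vinte" : 20 ,
--     "vinte e cinco" : 25 , "trinta" : 30 , "trinta e cinco" : 35 ,
--     "quarenta" : 40 , "quarenta e cinco" : 45 , "cinquenta" : 50 ,
--     "cinquenta e cinco" : 55 , "sessenta" : 60 , "sessenta e cinco" : 65 ,
--     "setenta" : 70 , "setenta e cinco" : 75 , "oitenta" : 80 ,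
--     "oitenta e cinco" : 85 , "noventa" : 90 , "noventa e cinco" : 95 ,
--     "cem" : 100 , "cento e cinco" : 105 , "cento e dez" : 110 ,
--     "cento e quinze" : 115 , "cento e vinte" : 120 , "cento e vinte e cinco" : 125 ,
--     "cento e trinta" : 130 , "cento e trinta e cinco" : 135 ,
--     "cento e quarenta" : 140 , "cento e quarenta e cinco" : 145 ,
--     "cento e cinquenta" : 150 , "cento e cinquenta e cinco" : 155 ,
--     "cento e sessenta" : 160 , "cento e sessenta e cinco" : 165 ,
--     "cento e setenta" : 170 , "cento e setenta e cinco" : 175 ,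
--     "cento e oitenta" : 180
-- }
--
-- def _extrair_valor_numerico(texto: str) -> int:
--     """
--     Encontra a sequencia numerica mais longa no texto
--     """
--     palavras = texto.split()
--
--     melhor_seq = ""
--     melhor_valor = 0
--
--     # procura sequencias de 1 a 5 palavras que valem pros mapas, sendo
--     # ex: cento e (alguma coisa) e (alguma coisa) -> 5 palavras
--     for comprimento in range (5, 0, -1):
--         for i in range(len(palavras) - comprimento + 1):
--             sequencia = " ".join(palavras[i:i+comprimento])
--
--             if sequencia in NUMEROS_MAP:
--                 valor = NUMEROS_MAP[sequencia]
--                 if comprimento > len(melhor_seq.split()):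
--                     melhor_seq = sequencia
--                     melhor_valor = valor
--     return melhor_valor
-- ===== SOURCE B (Python) =====
-- NUMEROS_MAP = {
--     "zero" : 0 , "cinco" : 5 , "dez" : 10 , "quinze" : 15 , "vinte" : 20 ,
--     "vinte e cinco" : 25 , "trinta" : 30 , "trinta e cinco" : 35 ,
--     "quarenta" : 40 , "quarenta e cinco" : 45 , "cinquenta" : 50 ,
--     "cinquenta e cinco" : 55 , "sessenta" : 60 , "sessenta e cinco" : 65 ,
--     "setenta" : 70 , "setenta e cinco" : 75 , "oitenta" : 80 ,
--     "oitenta e cinco" : 85 , "noventa" : 90 , "noventa e cinco" : 95 ,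
--     "cem" : 100 , "cento e cinco" : 105 , "cento e dez" : 110 ,
--     "cento e quinze" : 115 , "cento e vinte" : 120 , "cento e vinte e cinco" : 125 ,
--     "cento e trinta" : 130 , "cento e trinta e cinco" : 135 ,
--     "cento e quarenta" : 140 , "cento e quarenta e cinco" : 145 ,
--     "cento e cinquenta" : 150 , "cento e cinquenta e cinco" : 155 ,
--     "cento e sessenta" : 160 , "cento e sessenta e cinco" : 165 ,
--     "cento e setenta" : 170 , "cento e setenta e cinco" : 175 ,
--     "cento e oitenta" : 180
-- }
--
-- def _extrair_valor_numerico(texto: str) -> int: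
--     # Dictionary-major search: instead of enumerating text windows and looking each
--     # up in the map, iterate over the map's entries, locate the first occurrence of
--     # each entry's word list inside the text's words, and keep the entry with the
--     # most words, ties broken toward the earliest occurrence (leftmost-longest).
--     palavras = texto.split()
--     n = len(palavras)
--     best = None  # (word_count, first_index, value)
--     for chave, valor in NUMEROS_MAP.items():
--         kw = chave.split()
--         c = len(kw)
--         for i in range(n - c + 1):
--             if palavras[i:i+c] == kw:
--                 if best is None or c > best[0] or (c == best[0] and i < best[1]):
--                     best = (c, i, valor)
--                 break
--     return best[2] if best is not None else 0
-- ===== Notes on version B (the rewrite author's own statement) =====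
-- stated objective: alternative
-- what changed: Replaces A's window-major scan (enumerate every text window of length 5..1 and look each joined window up in the dictionary) with a dictionary-major search: iterate over the map's 37 entries, find the first occurrence of each entry's word list inside the text's word list, and keep the entry with the most words, ties broken toward the earliest occurrence.
import Mathlib
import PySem

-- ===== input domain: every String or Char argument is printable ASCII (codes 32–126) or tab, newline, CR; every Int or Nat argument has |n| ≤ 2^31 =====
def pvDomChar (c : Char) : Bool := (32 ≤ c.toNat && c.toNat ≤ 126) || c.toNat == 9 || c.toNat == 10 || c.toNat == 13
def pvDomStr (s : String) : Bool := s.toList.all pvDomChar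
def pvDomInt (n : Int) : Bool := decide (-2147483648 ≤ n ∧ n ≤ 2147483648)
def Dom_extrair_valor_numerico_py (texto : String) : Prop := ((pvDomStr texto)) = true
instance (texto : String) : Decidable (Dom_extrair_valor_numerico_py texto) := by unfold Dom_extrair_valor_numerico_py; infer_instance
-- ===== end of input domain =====

-- B is a dictionary-major search (locate each map entry's word list in the text, keep the
-- longest, earliest match) instead of A's window-major scan; objective: alternative algorithm.

-- module-level constant NUMEROS_MAP (shared by A and B, as in the Python module)
def numerosList : List (String × Int) := [
  ("zero", 0), ("cinco", 5), ("dez", 10), ("quinze", 15), ("vinte", 20),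
  ("vinte e cinco", 25), ("trinta", 30), ("trinta e cinco", 35),
  ("quarenta", 40), ("quarenta e cinco", 45), ("cinquenta", 50),
  ("cinquenta e cinco", 55), ("sessenta", 60), ("sessenta e cinco", 65),
  ("setenta", 70), ("setenta e cinco", 75), ("oitenta", 80),
  ("oitenta e cinco", 85), ("noventa", 90), ("noventa e cinco", 95),
  ("cem", 100), ("cento e cinco", 105), ("cento e dez", 110),
  ("cento e quinze", 115), ("cento e vinte", 120), ("cento e vinte e cinco", 125),
  ("cento e trinta", 130), ("cento e trinta e cinco", 135),
  ("cento e quarenta", 140), ("cento e quarenta e cinco", 145),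
  ("cento e cinquenta", 150), ("cento e cinquenta e cinco", 155),
  ("cento e sessenta", 160), ("cento e sessenta e cinco", 165),
  ("cento e setenta", 170), ("cento e setenta e cinco", 175),
  ("cento e oitenta", 180)]

def NUMEROS_MAP : PySem.Dict String Int := PySem.Dict.ofList numerosList

-- ===== PORT A =====
def extrair_valor_numerico_py (texto : String) : Int :=
  let palavras := PySem.Str.split₀ texto
  ((PySem.List.pyRange 5 0 (-1)).foldl (fun (st : String × Int) comprimento =>
      (PySem.List.pyRange 0 (PySem.List.len palavras - comprimento + 1) 1).foldl
        (fun (st : String × Int) i =>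
          let sequencia := PySem.Str.join " " (PySem.List.slice palavras (some i) (some (i + comprimento)))
          match NUMEROS_MAP.get? sequencia with
          | some valor =>
              if comprimento > PySem.List.len (PySem.Str.split₀ st.1) then (sequencia, valor) else st
          | none => st) st)
    ("", 0)).2

-- ===== PORT B =====
-- inner 'for i in range(n - c + 1): if palavras[i:i+c] == kw: …; break' of Source B
def bInner (palavras kw : List String) (c : Int) : List Int → Option Int
  | [] => none
  | i :: rest =>
      if PySem.List.slice palavras (some i) (some (i + c)) == kw then some i
      else bInner palavras kw c rest

-- loop body of Source B: try one dictionary entry, update best = (word_count, first_index, value)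
def bStep (palavras : List String) (n : Int) (best : Option (Int × Int × Int))
    (kv : String × Int) : Option (Int × Int × Int) :=
  let kw := PySem.Str.split₀ kv.1
  let c := PySem.List.len kw
  match bInner palavras kw c (PySem.List.pyRange 0 (n - c + 1) 1) with
  | some i =>
      match best with
      | none => some (c, i, kv.2)
      | some b => if c > b.1 ∨ (c = b.1 ∧ i < b.2.1) then some (c, i, kv.2) else best
  | none => best

def extrair_valor_numerico_py_alt (texto : String) : Int :=
  let palavras := PySem.Str.split₀ texto
  let n := PySem.List.len palavras
  match NUMEROS_MAP.items.foldl (bStep palavras n) none with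
  | some b => b.2.2
  | none => 0

-- ===== PRECONDITION & SPEC =====
def Spec_extrair_valor_numerico_py (texto : String) (out : Int) : Prop := out = extrair_valor_numerico_py_alt texto
instance (texto : String) (out : Int) : Decidable (Spec_extrair_valor_numerico_py texto out) := by unfold Spec_extrair_valor_numerico_py; infer_instance

-- ===== CLAIM (what is proved, stated in full; the proofs are below) =====
def Claim_equal_extrair_valor_numerico_py : Prop := ∀ (texto : String), Dom_extrair_valor_numerico_py texto → Spec_extrair_valor_numerico_py texto (extrair_valor_numerico_py texto)

-- ===== LEMMAS AND PROOFS =====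

set_option maxRecDepth 1000000

-- concrete facts about the dictionary literal
theorem items_numeros : NUMEROS_MAP.items = numerosList := by decide
theorem nodup_keys : NUMEROS_MAP.keys.Nodup := by decide
theorem wf_keys : ∀ kv ∈ numerosList, PySem.Str.join " " (PySem.Str.split₀ kv.1) = kv.1 ∧
    1 ≤ (PySem.Str.split₀ kv.1).length ∧ (PySem.Str.split₀ kv.1).length ≤ 5 := by decide

-- str.split() produces nonempty space-free tokens, and join/split invert on such tokens
theorem go_nil (cur : List Char) (acc : List (List Char)) : PySem.Chars.split₀.go [] cur acc = if cur.isEmpty then acc.reverse else (cur.reverse :: acc).reverse := rfl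

theorem go_cons (c : Char) (rest cur : List Char) (acc : List (List Char)) :
    PySem.Chars.split₀.go (c :: rest) cur acc =
      if PySem.Chars.isspace c then
        (if cur.isEmpty then PySem.Chars.split₀.go rest [] acc
         else PySem.Chars.split₀.go rest [] (cur.reverse :: acc))
      else PySem.Chars.split₀.go rest (c :: cur) acc := rfl

theorem go_tokens (s : List Char) : ∀ (cur : List Char) (acc : List (List Char)),
    (∀ ch ∈ cur, PySem.Chars.isspace ch = false) →
    (∀ t ∈ acc, t ≠ [] ∧ ∀ ch ∈ t, PySem.Chars.isspace ch = false) →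
    ∀ t ∈ PySem.Chars.split₀.go s cur acc, t ≠ [] ∧ ∀ ch ∈ t, PySem.Chars.isspace ch = false := by
  induction s with
  | nil =>
    intro cur acc hcur hacc t ht
    rw [go_nil] at ht
    by_cases h : cur.isEmpty
    · simp [h] at ht; exact hacc t ht
    · simp [h, List.mem_reverse] at ht
      rcases ht with h1 | h1
      · exact hacc t h1
      · subst h1
        constructor
        · simp [List.isEmpty_iff] at h; simpa using h
        · intro ch hch; exact hcur ch (by simpa using hch)
  | cons c rest ih =>
    intro cur acc hcur hacc t ht
    rw [go_cons] at ht
    by_cases hs : PySem.Chars.isspace c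
    · rw [if_pos hs] at ht
      by_cases h : cur.isEmpty
      · rw [if_pos h] at ht; exact ih [] acc (by simp) hacc t ht
      · rw [if_neg h] at ht
        refine ih [] _ (by simp) ?_ t ht
        intro u hu
        rcases List.mem_cons.1 hu with h1 | h1
        · subst h1
          exact ⟨by simp [List.isEmpty_iff] at h; simpa using h,
                 fun ch hch => hcur ch (by simpa using hch)⟩
        · exact hacc u h1
    · rw [if_neg hs] at ht
      refine ih (c :: cur) acc ?_ hacc t ht
      intro ch hch
      rcases List.mem_cons.1 hch with h1 | h1
      · subst h1; simpa using hs
      · exact hcur ch h1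

theorem split₀_tokens (s : List Char) :
    ∀ t ∈ PySem.Chars.split₀ s, t ≠ [] ∧ ∀ ch ∈ t, PySem.Chars.isspace ch = false := by
  intro t ht
  exact go_tokens s [] [] (by simp) (by simp) t ht

theorem go_append_tok (p : List Char) (hp : ∀ ch ∈ p, PySem.Chars.isspace ch = false) :
    ∀ (rest cur : List Char) (acc : List (List Char)),
    PySem.Chars.split₀.go (p ++ rest) cur acc = PySem.Chars.split₀.go rest (p.reverse ++ cur) acc := by
  induction p with
  | nil => intro rest cur acc; simp
  | cons c q ih =>
    intro rest cur acc
    have hc : PySem.Chars.isspace c = false := hp c (by simp)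
    rw [List.cons_append, go_cons, if_neg (by simp [hc])]
    rw [ih (fun ch hch => hp ch (by simp [hch])) rest (c :: cur) acc]
    simp

theorem go_join (parts : List (List Char))
    (h : ∀ p ∈ parts, p ≠ [] ∧ ∀ ch ∈ p, PySem.Chars.isspace ch = false) :
    ∀ acc : List (List Char), PySem.Chars.split₀.go (PySem.Chars.join [' '] parts) [] acc = acc.reverse ++ parts := by
  induction parts with
  | nil => intro acc; simp [PySem.Chars.join_nil, go_nil]
  | cons p rest ih =>
    intro acc
    obtain ⟨hpne, hpsp⟩ := h p (by simp)
    cases rest with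
    | nil =>
      rw [PySem.Chars.join_singleton]
      rw [show p = p ++ [] by simp, go_append_tok p hpsp [] [] acc, go_nil]
      simp [List.isEmpty_iff, hpne]
    | cons q r =>
      rw [PySem.Chars.join_cons_cons, List.append_assoc,
        go_append_tok p hpsp _ [] acc, List.singleton_append, go_cons,
        if_pos (by decide), if_neg (by simp [List.isEmpty_iff, hpne])]
      rw [ih (fun u hu => h u (by simp [hu])) _]
      simp

theorem split₀_join (parts : List (List Char))
    (h : ∀ p ∈ parts, p ≠ [] ∧ ∀ ch ∈ p, PySem.Chars.isspace ch = false) :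
    PySem.Chars.split₀ (PySem.Chars.join [' '] parts) = parts := by
  unfold PySem.Chars.split₀
  rw [go_join parts h []]
  simp

def okW (w : String) : Prop := w.toList ≠ [] ∧ ∀ ch ∈ w.toList, PySem.Chars.isspace ch = false

theorem str_split₀_tokens (s : String) : ∀ w ∈ PySem.Str.split₀ s, okW w := by
  intro w hw
  unfold PySem.Str.split₀ at hw
  rcases List.mem_map.1 hw with ⟨t, ht, rfl⟩
  obtain ⟨h1, h2⟩ := split₀_tokens s.toList t ht
  exact ⟨by simpa using h1, by simpa using h2⟩

theorem str_split₀_join (parts : List String) (h : ∀ p ∈ parts, okW p) :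
    PySem.Str.split₀ (PySem.Str.join " " parts) = parts := by
  unfold PySem.Str.split₀
  rw [PySem.Str.toList_join]
  have hsep : (" " : String).toList = [' '] := rfl
  rw [hsep, split₀_join (parts.map String.toList) (by
    intro p hp
    rcases List.mem_map.1 hp with ⟨w, hw, rfl⟩
    exact h w hw)]
  simp [Function.comp_def]

-- window key and match data
def keyAt (ws : List String) (i c : Nat) : String := PySem.Str.join " " ((ws.drop i).take c)
def hasM (ws : List String) (i c : Nat) : Bool := (NUMEROS_MAP.get? (keyAt ws i c)).isSome
def valM (ws : List String) (i c : Nat) : Int := (NUMEROS_MAP.get? (keyAt ws i c)).getD 0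

theorem split_keyAt {ws : List String} (hok : ∀ w ∈ ws, okW w) (i c : Nat) :
    PySem.Str.split₀ (keyAt ws i c) = (ws.drop i).take c := by
  unfold keyAt
  exact str_split₀_join _ (fun p hp => hok p (List.mem_of_mem_drop (List.mem_of_mem_take hp)))

theorem wcKey {ws : List String} (hok : ∀ w ∈ ws, okW w) {i c : Nat} (hic : i + c ≤ ws.length) :
    PySem.List.len (PySem.Str.split₀ (keyAt ws i c)) = (c : Int) := by
  rw [split_keyAt hok]
  simp [PySem.List.len_eq]
  omega

theorem seq_eq_keyAt (ws : List String) (k c : Nat) :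
    PySem.Str.join " " (PySem.List.slice ws (some (k : Int)) (some ((k : Int) + (c : Int)))) = keyAt ws k c := by
  rw [PySem.List.slice_natCast_add]
  rfl

theorem foldl_fixed {α β : Type} {f : β → α → β} {s : β} {l : List α}
    (h : ∀ a ∈ l, f s a = s) : l.foldl f s = s := by
  induction l with
  | nil => rfl
  | cons a l ih =>
    simp only [List.foldl_cons, h a (by simp)]
    exact ih (fun a ha => h a (by simp [ha]))

theorem find?_congr {α : Type} {p q : α → Bool} {l : List α}
    (h : ∀ a ∈ l, p a = q a) : l.find? p = l.find? q := by
  induction l with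
  | nil => rfl
  | cons a l ih =>
    simp only [List.find?_cons, h a (by simp)]
    cases q a
    · exact ih (fun a ha => h a (by simp [ha]))
    · rfl

-- A's inner-loop body
def stepA (ws : List String) (c : Int) (st : String × Int) (i : Int) : String × Int :=
  let sequencia := PySem.Str.join " " (PySem.List.slice ws (some i) (some (i + c)))
  match NUMEROS_MAP.get? sequencia with
  | some valor =>
      if c > PySem.List.len (PySem.Str.split₀ st.1) then (sequencia, valor) else st
  | none => st

theorem innerA_blocked (ws : List String) (c : Int) (st : String × Int)
    (hst : ¬ (c > PySem.List.len (PySem.Str.split₀ st.1))) (l : List Int) :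
    l.foldl (stepA ws c) st = st := by
  refine foldl_fixed (fun i _ => ?_)
  unfold stepA
  cases h : NUMEROS_MAP.get? (PySem.Str.join " " (PySem.List.slice ws (some i) (some (i + c)))) with
  | some v => simp only [h]; rw [if_neg hst]
  | none => simp only [h]

theorem innerA_char {ws : List String} (hok : ∀ w ∈ ws, okW w) (c : Nat) (hc : 1 ≤ c)
    (M : Nat) (hM : ∀ i < M, i + c ≤ ws.length) :
    (List.range M).foldl (fun st (k : Nat) => stepA ws (c : Int) st (k : Int)) ("", 0) =
      (match (List.range M).find? (fun i => hasM ws i c) with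
       | some i => (keyAt ws i c, valM ws i c)
       | none => ("", 0)) := by
  induction M with
  | zero => rfl
  | succ M ih =>
    have hM' : ∀ i < M, i + c ≤ ws.length := fun i hi => hM i (by omega)
    rw [List.range_succ, List.foldl_append, List.find?_append, ih hM']
    cases hfind : (List.range M).find? (fun i => hasM ws i c) with
    | some i =>
      have hi : i < M := by
        have := List.mem_of_find?_eq_some hfind
        simpa using this
      have hwc : PySem.List.len (PySem.Str.split₀ (keyAt ws i c)) = (c : Int) :=
        wcKey hok (hM i (by omega))
      simp only [List.foldl_cons, List.foldl_nil, Option.some_or]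
      unfold stepA
      cases h : NUMEROS_MAP.get? (PySem.Str.join " " (PySem.List.slice ws (some (M:Int)) (some ((M:Int) + (c:Int))))) with
      | some v => simp only [h]; rw [if_neg (by rw [hwc]; omega)]
      | none => simp only [h]
    | none =>
      simp only [List.foldl_cons, List.foldl_nil, Option.none_or]
      unfold stepA
      rw [seq_eq_keyAt ws M c]
      cases hg : NUMEROS_MAP.get? (keyAt ws M c) with
      | some v =>
        have hp : hasM ws M c = true := by simp [hasM, hg]
        simp [hp, valM, hg]
        exact fun h0 => absurd h0 (by omega)
      | none =>
        have hp : hasM ws M c = false := by simp [hasM, hg]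
        simp [hp, hg]

-- A's nested result, length-major
def resA (ws : List String) : List Nat → String × Int
  | [] => ("", 0)
  | c :: rest =>
    match (List.range (((ws.length : Int) - c + 1).toNat)).find? (fun i => hasM ws i c) with
    | some i => (keyAt ws i c, valM ws i c)
    | none => resA ws rest

theorem innerA_pyRange (ws : List String) (c : Nat) (st : String × Int) :
    (PySem.List.pyRange 0 ((ws.length : Int) - (c : Int) + 1) 1).foldl (stepA ws (c:Int)) st =
      (List.range (((ws.length : Int) - c + 1).toNat)).foldl (fun st (k : Nat) => stepA ws (c : Int) st (k : Int)) st := by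
  rw [PySem.List.pyRange_one, List.foldl_map]
  simp

theorem A_chain {ws : List String} (hok : ∀ w ∈ ws, okW w) (cs : List Nat)
    (h1 : ∀ c ∈ cs, 1 ≤ c) (hdesc : cs.Pairwise (fun a b => b < a)) :
    (List.map (fun (c : Nat) => (c : Int)) cs).foldl
      (fun st c => (PySem.List.pyRange 0 ((ws.length : Int) - c + 1) 1).foldl (stepA ws c) st) ("", 0)
      = resA ws cs := by
  induction cs with
  | nil => rfl
  | cons c rest ih =>
    rw [List.map_cons, List.foldl_cons, innerA_pyRange,
      innerA_char hok c (h1 c (by simp)) _ (fun i hi => by omega)]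
    cases hfind : (List.range (((ws.length : Int) - c + 1).toNat)).find? (fun i => hasM ws i c) with
    | some i =>
      have hi : i < ((ws.length : Int) - c + 1).toNat := by
        have := List.mem_of_find?_eq_some hfind
        simpa using this
      have hwc : PySem.List.len (PySem.Str.split₀ (keyAt ws i c)) = (c : Int) :=
        wcKey hok (by omega)
      simp only [resA, hfind]
      refine foldl_fixed (fun ci hci => ?_)
      rcases List.mem_map.1 hci with ⟨c', hc', rfl⟩
      have hlt : c' < c := (List.pairwise_cons.1 hdesc).1 c' hc'
      exact innerA_blocked ws (c' : Int) _ (by rw [hwc]; omega) _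
    | none =>
      simp only [resA, hfind]
      exact ih (fun c hc => h1 c (by simp [hc])) (List.pairwise_cons.1 hdesc).2

theorem A_eq_resA {texto : String} :
    extrair_valor_numerico_py texto = (resA (PySem.Str.split₀ texto) [5,4,3,2,1]).2 := by
  have h5 : PySem.List.pyRange 5 0 (-1) = List.map (fun (c : Nat) => (c : Int)) [5,4,3,2,1] := by decide
  show (List.foldl (fun st c =>
      (PySem.List.pyRange 0 (PySem.List.len (PySem.Str.split₀ texto) - c + 1) 1).foldl
        (stepA (PySem.Str.split₀ texto) c) st) ("", 0) (PySem.List.pyRange 5 0 (-1))).2 = _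
  rw [h5]
  simp only [PySem.List.len_eq]
  rw [A_chain (str_split₀_tokens texto) [5,4,3,2,1] (by decide) (by decide)]

-- the canonical notion both sides are reduced to: a dictionary match at window (i, c)
def MatchAt (ws : List String) (c i : Nat) : Prop :=
  1 ≤ c ∧ c ≤ 5 ∧ i + c ≤ ws.length ∧ hasM ws i c = true

def IsBest (ws : List String) (c i : Nat) : Prop :=
  MatchAt ws c i ∧ ∀ c' i', MatchAt ws c' i' → (c' < c ∨ (c' = c ∧ i ≤ i'))

-- first-match characterisation of find? over a range
theorem range_find?_spec (p : Nat → Bool) (m : Nat) :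
    ((List.range m).find? p = none ∧ ∀ k < m, p k = false) ∨
    (∃ j, (List.range m).find? p = some j ∧ j < m ∧ p j = true ∧ ∀ k < j, p k = false) := by
  induction m with
  | zero => left; exact ⟨rfl, by omega⟩
  | succ m ih =>
    rw [List.range_succ]
    rcases ih with ⟨hf, hall⟩ | ⟨j, hf, hj, hp, hmin⟩
    · rw [List.find?_append, hf, Option.none_or]
      by_cases hm : p m
      · right
        exact ⟨m, by simp [hm], by omega, hm, fun k hk => hall k hk⟩
      · left
        refine ⟨by simp [Bool.of_not_eq_true hm], fun k hk => ?_⟩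
        by_cases h : k = m
        · subst h; exact Bool.of_not_eq_true hm
        · exact hall k (by omega)
    · right
      rw [List.find?_append, hf]
      exact ⟨j, rfl, by omega, hp, hmin⟩

theorem resA_none (ws : List String) (cs : List Nat) (h1 : ∀ c ∈ cs, 1 ≤ c)
    (hno : ∀ c ∈ cs, ∀ i, i + c ≤ ws.length → hasM ws i c = false) :
    resA ws cs = ("", 0) := by
  induction cs with
  | nil => rfl
  | cons c rest ih =>
    have hfind : (List.range (((ws.length : Int) - c + 1).toNat)).find? (fun i => hasM ws i c) = none := by
      rw [List.find?_eq_none]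
      intro i hi
      have hir : i < ((ws.length : Int) - c + 1).toNat := by simpa using hi
      simp [hno c (by simp) i (by omega)]
    simp only [resA, hfind]
    exact ih (fun c hc => h1 c (by simp [hc])) (fun c hc => hno c (by simp [hc]))

theorem resA_best (ws : List String) (cs : List Nat)
    (hprops : ∀ c ∈ cs, 1 ≤ c ∧ c ≤ 5) (hdesc : cs.Pairwise (fun a b => b < a))
    {cb ib : Nat} (hb : IsBest ws cb ib) (hmem : cb ∈ cs) :
    resA ws cs = (keyAt ws ib cb, valM ws ib cb) := by
  induction cs with
  | nil => cases hmem
  | cons c rest ih =>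
    obtain ⟨⟨hc1, hc5, hic, hhas⟩, hdom⟩ := hb
    by_cases hceq : c = cb
    · subst hceq
      have hlt : ib < (((ws.length : Int) - c + 1)).toNat := by omega
      have hfind : (List.range (((ws.length : Int) - c + 1).toNat)).find? (fun i => hasM ws i c) = some ib := by
        rcases range_find?_spec (fun i => hasM ws i c) (((ws.length : Int) - c + 1).toNat) with
          ⟨_, hall⟩ | ⟨j, hf, hj, hp, hmin⟩
        · exact absurd hhas (by simp [hall ib hlt])
        · have hij : ib ≤ j := by
            rcases hdom c j ⟨hc1, hc5, by omega, hp⟩ with h | ⟨_, h⟩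
            · omega
            · exact h
          have hji : ¬ (ib < j) := fun h => by simp [hmin ib h] at hhas
          have : j = ib := by omega
          subst this; exact hf
      simp only [resA, hfind]
    · have hcb_rest : cb ∈ rest := by
        rcases List.mem_cons.1 hmem with h | h
        · exact absurd h.symm hceq
        · exact h
      have hcbc : cb < c := (List.pairwise_cons.1 hdesc).1 cb hcb_rest
      have hfind : (List.range (((ws.length : Int) - c + 1).toNat)).find? (fun i => hasM ws i c) = none := by
        rw [List.find?_eq_none]
        intro i hi
        have hir : i < ((ws.length : Int) - c + 1).toNat := by simpa using hi
        by_contra hcon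
        have hm : MatchAt ws c i :=
          ⟨(hprops c (by simp)).1, (hprops c (by simp)).2, by omega, by simpa using hcon⟩
        rcases hdom c i hm with h | ⟨h, _⟩ <;> omega
      simp only [resA, hfind]
      exact ih (fun c hc => hprops c (by simp [hc])) (List.pairwise_cons.1 hdesc).2 hcb_rest

-- B-side: first occurrence of a word list, at the specification level
def specOcc (ws kw : List String) : Option Nat :=
  (List.range (ws.length + 1 - kw.length)).find? (fun i => decide ((ws.drop i).take kw.length = kw))

theorem bInner_find (ws kw : List String) (c : Int) (l : List Int) :
    bInner ws kw c l = l.find? (fun i => PySem.List.slice ws (some i) (some (i + c)) == kw) := by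
  induction l with
  | nil => rfl
  | cons i rest ih =>
    rw [List.find?_cons]
    by_cases h : PySem.List.slice ws (some i) (some (i + c)) == kw
    · simp [bInner, h]
    · simp only [bInner, Bool.of_not_eq_true h]
      exact ih

theorem bInner_eq_specOcc (ws kw : List String) :
    bInner ws kw ((kw.length : Nat) : Int)
        (PySem.List.pyRange 0 ((ws.length : Int) - (kw.length : Int) + 1) 1) =
      (specOcc ws kw).map (fun i => (i : Int)) := by
  rw [bInner_find, PySem.List.pyRange_one, List.find?_map]
  have hm : (((ws.length : Int) - (kw.length : Int) + 1) - 0).toNat = ws.length + 1 - kw.length := by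
    omega
  rw [hm]
  unfold specOcc
  rw [find?_congr (l := List.range (ws.length + 1 - kw.length))
    (q := fun i => decide ((ws.drop i).take kw.length = kw)) (fun i hi => ?_)]
  · cases hf : (List.range (ws.length + 1 - kw.length)).find? (fun i => decide ((ws.drop i).take kw.length = kw)) with
    | some j => simp
    | none => simp
  · simp only [Function.comp]
    have : (0 : Int) + (i : Int) = ((i : Nat) : Int) := by omega
    rw [this, PySem.List.slice_natCast_add]
    by_cases h : (ws.drop i).take kw.length = kw
    · simp [h]
    · simp [h]

-- a key occurrence is a dictionary match, with the key's own value
theorem occ_match {ws : List String} {kv : String × Int}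
    (hkv : kv ∈ numerosList) {idx : Nat}
    (h : specOcc ws (PySem.Str.split₀ kv.1) = some idx) :
    MatchAt ws (PySem.Str.split₀ kv.1).length idx ∧
      valM ws idx (PySem.Str.split₀ kv.1).length = kv.2 := by
  obtain ⟨hjoin, h1, h5⟩ := wf_keys kv hkv
  unfold specOcc at h
  rcases range_find?_spec
      (fun i => decide ((ws.drop i).take (PySem.Str.split₀ kv.1).length = PySem.Str.split₀ kv.1))
      (ws.length + 1 - (PySem.Str.split₀ kv.1).length) with ⟨hf, _⟩ | ⟨j, hf, hj, hp, _⟩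
  · rw [hf] at h; cases h
  · rw [hf] at h
    injection h with h; subst h
    have hwin : (ws.drop j).take (PySem.Str.split₀ kv.1).length = PySem.Str.split₀ kv.1 := by
      simpa using hp
    have hic : j + (PySem.Str.split₀ kv.1).length ≤ ws.length := by
      have hlen := congrArg List.length hwin
      simp only [List.length_take, List.length_drop] at hlen
      omega
    have hkey : keyAt ws j (PySem.Str.split₀ kv.1).length = kv.1 := by
      unfold keyAt; rw [hwin, hjoin]
    have hget : NUMEROS_MAP.get? (keyAt ws j (PySem.Str.split₀ kv.1).length) = some kv.2 := by
      rw [hkey]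
      exact PySem.Dict.get?_of_mem_items NUMEROS_MAP
        (by rw [items_numeros]; exact hkv) nodup_keys
    exact ⟨⟨h1, h5, hic, by simp [hasM, hget]⟩, by simp [valM, hget]⟩

-- every dictionary match is witnessed by a key whose first occurrence is no later
theorem match_occ {ws : List String} (hok : ∀ w ∈ ws, okW w) {c i : Nat}
    (hm : MatchAt ws c i) :
    ∃ kv ∈ numerosList, (PySem.Str.split₀ kv.1).length = c ∧
      ∃ idx, idx ≤ i ∧ specOcc ws (PySem.Str.split₀ kv.1) = some idx := by
  obtain ⟨hc1, _, hic, hhas⟩ := hm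
  obtain ⟨v, hget⟩ := Option.isSome_iff_exists.1 (by simpa [hasM] using hhas)
  have hmem : (keyAt ws i c, v) ∈ numerosList := by
    rw [← items_numeros]
    exact PySem.Dict.mem_items_of_get?_eq_some NUMEROS_MAP hget
  refine ⟨(keyAt ws i c, v), hmem, ?_, ?_⟩
  · rw [split_keyAt hok]
    simp; omega
  · have hsp : PySem.Str.split₀ (keyAt ws i c) = (ws.drop i).take c := split_keyAt hok i c
    have hlen : (PySem.Str.split₀ (keyAt ws i c)).length = c := by rw [hsp]; simp; omega
    rcases range_find?_spec
        (fun j => decide ((ws.drop j).take (PySem.Str.split₀ (keyAt ws i c)).length = PySem.Str.split₀ (keyAt ws i c)))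
        (ws.length + 1 - (PySem.Str.split₀ (keyAt ws i c)).length) with
      ⟨hf, hall⟩ | ⟨j, hf, hj, hp, hmin⟩
    · exfalso
      have := hall i (by omega)
      rw [hlen, hsp] at this
      simp at this
    · refine ⟨j, ?_, by rw [specOcc.eq_def, hf]⟩
      by_contra hcon
      have := hmin i (by omega)
      rw [hlen, hsp] at this
      simp at this

-- the invariant B's fold maintains over the processed prefix of the item list
def Good (ws : List String) (l : List (String × Int)) (st : Option (Int × Int × Int)) : Prop :=
  (st = none → ∀ kv ∈ l, specOcc ws (PySem.Str.split₀ kv.1) = none) ∧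
  (∀ b, st = some b →
    (∃ kv ∈ l, ∃ cN idxN : Nat, b = ((cN : Int), (idxN : Int), kv.2) ∧
      (PySem.Str.split₀ kv.1).length = cN ∧ specOcc ws (PySem.Str.split₀ kv.1) = some idxN) ∧
    (∀ kv ∈ l, ∀ idx : Nat, specOcc ws (PySem.Str.split₀ kv.1) = some idx →
      ¬ (((PySem.Str.split₀ kv.1).length : Int) > b.1 ∨
         (((PySem.Str.split₀ kv.1).length : Int) = b.1 ∧ (idx : Int) < b.2.1))))

theorem bStep_occ_none (ws : List String) (st : Option (Int × Int × Int)) (kv : String × Int)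
    (h : specOcc ws (PySem.Str.split₀ kv.1) = none) :
    bStep ws ((ws.length : Nat) : Int) st kv = st := by
  unfold bStep
  simp only [PySem.List.len_eq]
  rw [bInner_eq_specOcc ws (PySem.Str.split₀ kv.1), h]
  rfl

theorem bStep_occ_first (ws : List String) (kv : String × Int) {idx : Nat}
    (h : specOcc ws (PySem.Str.split₀ kv.1) = some idx) :
    bStep ws ((ws.length : Nat) : Int) none kv =
      some ((((PySem.Str.split₀ kv.1).length : Nat) : Int), (idx : Int), kv.2) := by
  unfold bStep
  simp only [PySem.List.len_eq]
  rw [bInner_eq_specOcc ws (PySem.Str.split₀ kv.1), h]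
  rfl

theorem bStep_occ_best (ws : List String) (b : Int × Int × Int) (kv : String × Int) {idx : Nat}
    (h : specOcc ws (PySem.Str.split₀ kv.1) = some idx) :
    bStep ws ((ws.length : Nat) : Int) (some b) kv =
      (if (((PySem.Str.split₀ kv.1).length : Nat) : Int) > b.1 ∨
          ((((PySem.Str.split₀ kv.1).length : Nat) : Int) = b.1 ∧ (idx : Int) < b.2.1)
       then some ((((PySem.Str.split₀ kv.1).length : Nat) : Int), (idx : Int), kv.2)
       else some b) := by
  unfold bStep
  simp only [PySem.List.len_eq]
  rw [bInner_eq_specOcc ws (PySem.Str.split₀ kv.1), h]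
  rfl

theorem good_step {ws : List String} {l : List (String × Int)} {st : Option (Int × Int × Int)}
    (hg : Good ws l st) (kv : String × Int) :
    Good ws (l ++ [kv]) (bStep ws ((ws.length : Nat) : Int) st kv) := by
  obtain ⟨hnone, hsome⟩ := hg
  cases hocc : specOcc ws (PySem.Str.split₀ kv.1) with
  | none =>
    rw [bStep_occ_none ws st kv hocc]
    refine ⟨fun hst kv' hkv' => ?_, fun b hst => ?_⟩
    · rcases List.mem_append.1 hkv' with h | h
      · exact hnone hst kv' h
      · simp at h; subst h; exact hocc
    · obtain ⟨hwit, hdom⟩ := hsome b hst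
      refine ⟨?_, fun kv' hkv' idx hidx => ?_⟩
      · obtain ⟨kv', hkv', rest⟩ := hwit
        exact ⟨kv', List.mem_append.2 (Or.inl hkv'), rest⟩
      · rcases List.mem_append.1 hkv' with h | h
        · exact hdom kv' h idx hidx
        · simp at h; subst h; rw [hocc] at hidx; cases hidx
  | some idx =>
    cases st with
    | none =>
      rw [bStep_occ_first ws kv hocc]
      refine ⟨fun h => (nomatch h), fun b hb => ?_⟩
      injection hb with hb; subst hb
      refine ⟨⟨kv, List.mem_append.2 (Or.inr (by simp)), (PySem.Str.split₀ kv.1).length, idx,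
        rfl, rfl, hocc⟩, fun kv' hkv' idx' hidx' => ?_⟩
      rcases List.mem_append.1 hkv' with h | h
      · rw [hnone rfl kv' h] at hidx'; cases hidx'
      · simp at h; subst h
        rw [hocc] at hidx'
        injection hidx' with hidx'; subst hidx'
        simp only []
        omega
    | some b =>
      obtain ⟨hwit, hdom⟩ := hsome b rfl
      rw [bStep_occ_best ws b kv hocc]
      by_cases hcond : (((PySem.Str.split₀ kv.1).length : Nat) : Int) > b.1 ∨
          ((((PySem.Str.split₀ kv.1).length : Nat) : Int) = b.1 ∧ (idx : Int) < b.2.1)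
      · rw [if_pos hcond]
        refine ⟨fun h => (nomatch h), fun b' hb' => ?_⟩
        injection hb' with hb'; subst hb'
        refine ⟨⟨kv, List.mem_append.2 (Or.inr (by simp)), (PySem.Str.split₀ kv.1).length, idx,
          rfl, rfl, hocc⟩, fun kv' hkv' idx' hidx' => ?_⟩
        rcases List.mem_append.1 hkv' with h | h
        · have := hdom kv' h idx' hidx'
          simp only [] at this ⊢
          omega
        · simp at h; subst h
          rw [hocc] at hidx'
          injection hidx' with hidx'; subst hidx'
          simp only []
          omega
      · rw [if_neg hcond]
        refine ⟨fun h => (nomatch h), fun b' hb' => ?_⟩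
        injection hb' with hb'; subst hb'
        refine ⟨?_, fun kv' hkv' idx' hidx' => ?_⟩
        · obtain ⟨kv', hkv', rest⟩ := hwit
          exact ⟨kv', List.mem_append.2 (Or.inl hkv'), rest⟩
        · rcases List.mem_append.1 hkv' with h | h
          · exact hdom kv' h idx' hidx'
          · simp at h; subst h
            rw [hocc] at hidx'
            injection hidx' with hidx'; subst hidx'
            exact hcond

theorem good_foldl (ws : List String) (l : List (String × Int)) :
    Good ws l (l.foldl (bStep ws ((ws.length : Nat) : Int)) none) := by
  induction l using List.reverseRecOn with
  | nil => exact ⟨fun _ kv h => absurd h (List.not_mem_nil), fun b hb => (nomatch hb)⟩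
  | append_singleton l kv ih =>
    rw [List.foldl_append, List.foldl_cons, List.foldl_nil]
    exact good_step ih kv

theorem B_unfold (texto : String) :
    extrair_valor_numerico_py_alt texto =
      (match numerosList.foldl
          (bStep (PySem.Str.split₀ texto) (((PySem.Str.split₀ texto).length : Nat) : Int)) none with
       | some b => b.2.2
       | none => 0) := by
  show (match NUMEROS_MAP.items.foldl
      (bStep (PySem.Str.split₀ texto) (PySem.List.len (PySem.Str.split₀ texto))) none with
    | some b => b.2.2
    | none => 0) = _
  rw [items_numeros]
  simp only [PySem.List.len_eq]

theorem A_eq_B (texto : String) : extrair_valor_numerico_py texto = extrair_valor_numerico_py_alt texto := by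
  set ws := PySem.Str.split₀ texto with hws
  have hok : ∀ w ∈ ws, okW w := str_split₀_tokens texto
  rw [A_eq_resA, B_unfold]
  have hg := good_foldl ws numerosList
  cases hF : numerosList.foldl (bStep ws ((ws.length : Nat) : Int)) none with
  | none =>
    rw [hF] at hg
    have hno := hg.1 rfl
    have hres : resA ws [5,4,3,2,1] = ("", 0) := by
      refine resA_none ws _ (by decide) (fun c hc i hic => ?_)
      by_contra hcon
      have hc' : 1 ≤ c ∧ c ≤ 5 := by simp at hc; omega
      have hm : MatchAt ws c i := ⟨hc'.1, hc'.2, hic, by simpa using hcon⟩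
      obtain ⟨kv, hkv, _, idx, _, hoc⟩ := match_occ hok hm
      rw [hno kv hkv] at hoc
      cases hoc
    rw [hres]
  | some b =>
    rw [hF] at hg
    obtain ⟨⟨kv, hkv, cN, idxN, hb, hlen, hoc⟩, hdom⟩ := hg.2 b rfl
    obtain ⟨hmatch, hval⟩ := occ_match hkv hoc
    rw [hlen] at hmatch hval
    have hbest : IsBest ws cN idxN := by
      refine ⟨hmatch, fun c' i' hm' => ?_⟩
      obtain ⟨kv', hkv', hlen', idx', hle', hoc'⟩ := match_occ hok hm'
      have hd := hdom kv' hkv' idx' hoc'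
      rw [hlen', hb] at hd
      simp only [] at hd
      omega
    have hcmem : cN ∈ [5,4,3,2,1] := by
      obtain ⟨h1, h5, _, _⟩ := hmatch
      interval_cases cN <;> simp
    rw [resA_best ws [5,4,3,2,1] (by decide) (by decide) hbest hcmem, hb]
    exact hval

-- ===== VERDICT (by name: the statement is the Claim_ definition above) =====
theorem extrair_valor_numerico_py_spec : Claim_equal_extrair_valor_numerico_py := by
  intro texto _hdom
  unfold Spec_extrair_valor_numerico_py
  exact A_eq_B texto
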